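-- pv_equiv track=rewrite | github.com/PPchayutt/PSCP | FN-2022/Socks.py | sort_socks
-- ===== SOURCE A (Python) =====
-- def count_socks(socks):
--     """count socks"""
--     sock_count = {}
--     for sock in socks:
--         if sock in sock_count:
--             sock_count[sock] += 1
--         else:
--             sock_count[sock] = 1
--     return sock_count
--
-- def sort_socks(socks):
--     """sort socks"""
--     sock_count = count_socks(socks)
--     paired_socks = []
--     total_pairs = 0
--     for sock in sorted(sock_count.keys()):
--         count = sock_count[sock]
--         pairs = count // 2
--         if pairs > 0:
--             paired_socks.extend([sock * 2] * pairs)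
--             total_pairs += pairs
--     result = " ".join(paired_socks) if paired_socks else "None"
--     return result, total_pairs
-- ===== SOURCE B (Python) =====
-- def sort_socks(socks):
--     """sort socks"""
--     s = sorted(socks)
--     paired_socks = []
--     total_pairs = 0
--     i, n = 0, len(s)
--     while i < n:
--         j = i + 1
--         while j < n and s[j] == s[i]:
--             j += 1
--         pairs = (j - i) // 2
--         paired_socks += [s[i] * 2] * pairs
--         total_pairs += pairs
--         i = j
--     result = " ".join(paired_socks) if paired_socks else "None"
--     return result, total_pairs
-- ===== Notes on version B (the rewrite author's own statement) =====
-- stated objective: alternative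
-- what changed: B sorts the whole input list once and scans runs of equal socks with a two-pointer sweep, instead of A's hash-map counting pass followed by sorting the distinct keys and looking each count up again.
import Mathlib
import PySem

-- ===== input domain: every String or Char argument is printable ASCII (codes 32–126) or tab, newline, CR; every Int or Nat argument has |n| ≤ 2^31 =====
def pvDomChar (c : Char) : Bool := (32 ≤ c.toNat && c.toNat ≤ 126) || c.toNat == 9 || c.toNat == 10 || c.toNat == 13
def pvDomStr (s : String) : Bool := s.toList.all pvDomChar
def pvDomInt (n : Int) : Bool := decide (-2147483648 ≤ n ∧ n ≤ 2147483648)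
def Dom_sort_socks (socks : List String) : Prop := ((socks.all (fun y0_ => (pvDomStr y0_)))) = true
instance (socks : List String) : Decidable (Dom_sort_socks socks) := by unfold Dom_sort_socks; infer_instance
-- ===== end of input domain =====

-- B replaces A's dict-count-then-sort-the-keys with one sort of the whole list and a two-pointer run scan; alternative decomposition, same value.

-- shared helper: Python's sock * 2 (string repetition, exact for repetition count 2)
def pvStrMul2 (s : String) : String := String.ofList (s.toList ++ s.toList)

-- ===== PORT A =====
def count_socks (socks : List String) : PySem.Dict String Int :=
  socks.foldl (fun d sock =>
    if d.contains sock then d.insert sock (d.getD sock 0 + 1)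
    else d.insert sock 1) PySem.Dict.empty

def sort_socks (socks : List String) : String × Int :=
  let sock_count := count_socks socks
  let res := (PySem.List.sorted sock_count.keys (fun x => x) false).foldl
    (fun acc sock =>
      let count := sock_count.getD sock 0
      let pairs := PySem.Int.floordiv count 2
      if pairs > 0 then
        (acc.1 ++ List.replicate pairs.toNat (pvStrMul2 sock), acc.2 + pairs)
      else acc) (([] : List String), (0 : Int))
  (if res.1 = [] then "None" else PySem.Str.join " " res.1, res.2)

-- ===== PORT B =====
-- Source B's two while loops, as recursion on the sorted list: one run of equal socks per step
def pvRunsB : List String → List String × Int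
  | [] => ([], 0)
  | x :: rest =>
    let run := rest.takeWhile (fun y => y == x)
    let rest' := rest.dropWhile (fun y => y == x)
    let pairs := (run.length + 1) / 2
    let r := pvRunsB rest'
    (List.replicate pairs (pvStrMul2 x) ++ r.1, (pairs : Int) + r.2)
termination_by l => l.length
decreasing_by
  exact Nat.lt_succ_of_le (List.length_dropWhile_le _ _)

def sort_socks_alt (socks : List String) : String × Int :=
  let r := pvRunsB (PySem.List.sorted socks (fun x => x) false)
  (if r.1 = [] then "None" else PySem.Str.join " " r.1, r.2)

-- ===== PRECONDITION & SPEC =====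
def Spec_sort_socks (socks : List String) (out : String × Int) : Prop := out = sort_socks_alt socks
instance (socks : List String) (out : String × Int) : Decidable (Spec_sort_socks socks out) := by unfold Spec_sort_socks; infer_instance

-- ===== CLAIM (what is proved, stated in full; the proofs are below) =====
def Claim_equal_sort_socks : Prop := ∀ (socks : List String), Dom_sort_socks socks → Spec_sort_socks socks (sort_socks socks)

-- ===== LEMMAS AND PROOFS =====

-- the sorted distinct socks: A's sorted key list and B's list of run heads
def pvKeys (socks : List String) : List String :=
  PySem.List.sorted (PySem.Set.ofList socks) (fun x => x) false

lemma pvKeys_nodup (socks : List String) : (pvKeys socks).Nodup :=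
  ((PySem.List.sorted_perm _ _ _).nodup_iff).mpr (PySem.Set.nodup_ofList socks)

lemma pvKeys_mem (socks : List String) (y : String) : y ∈ pvKeys socks ↔ y ∈ socks := by
  rw [pvKeys, PySem.List.mem_sorted, PySem.Set.mem_ofList]

lemma pvKeys_pairwise (socks : List String) : (pvKeys socks).Pairwise (· < ·) :=
  PySem.List.sorted_ofList_pairwise_lt socks

-- A's counting loop is Counter(socks)
lemma count_socks_eq_counter (socks : List String) :
    count_socks socks = PySem.Dict.counter socks := by
  have hstep : (fun (d : PySem.Dict String Int) sock =>
      if d.contains sock then d.insert sock (d.getD sock 0 + 1)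
      else d.insert sock 1)
      = fun (d : PySem.Dict String Int) x => d.insert x (d.getD x 0 + 1) := by
    funext d x
    by_cases h : d.contains x
    · simp [h]
    · rw [if_neg h]
      have h' : ∀ p ∈ d.items, ¬ (p.1 == x) = true := by
        intro p hp hpx
        apply h
        rw [PySem.Dict.contains, List.any_eq_true]
        exact ⟨p, hp, hpx⟩
      have hg : d.get? x = none := by
        simp [PySem.Dict.get?, List.find?_eq_none.mpr h']
      simp [PySem.Dict.getD, hg]
  rw [count_socks, hstep, PySem.Dict.foldl_insert_getD_add_one_eq_counter]

-- the body of A's output loop, abstracted over the count dict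
def pvStepA (d : PySem.Dict String Int) (acc : List String × Int) (sock : String) : List String × Int :=
  let count := d.getD sock 0
  let pairs := PySem.Int.floordiv count 2
  if pairs > 0 then
    (acc.1 ++ List.replicate pairs.toNat (pvStrMul2 sock), acc.2 + pairs)
  else acc

lemma pvStepA_eq (socks : List String) (acc : List String × Int) (k : String) :
    pvStepA (PySem.Dict.counter socks) acc k =
      if (0 : Int) < ((socks.count k / 2 : Nat) : Int) then
        (acc.1 ++ List.replicate (socks.count k / 2) (pvStrMul2 k),
         acc.2 + ((socks.count k / 2 : Nat) : Int))
      else acc := by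
  have h2 : PySem.Int.floordiv ((socks.count k : Nat) : Int) 2
      = ((socks.count k / 2 : Nat) : Int) := by
    exact_mod_cast PySem.Int.floordiv_natCast (socks.count k) 2
  simp only [pvStepA, PySem.Dict.getD_counter, h2, Int.toNat_natCast, gt_iff_lt]

-- A's output loop, characterised over any key list
lemma pvFoldA (socks : List String) :
    ∀ (l : List String) (ps : List String) (t : Int),
      l.foldl (pvStepA (PySem.Dict.counter socks)) (ps, t)
      = (ps ++ l.flatMap (fun k => List.replicate (socks.count k / 2) (pvStrMul2 k)),
         t + (l.map (fun k => ((socks.count k / 2 : Nat) : Int))).sum) := by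
  intro l
  induction l with
  | nil => intro ps t; simp
  | cons k l ih =>
    intro ps t
    rw [List.foldl_cons, pvStepA_eq]
    by_cases h : (0 : Int) < ((socks.count k / 2 : Nat) : Int)
    · rw [if_pos h, ih]
      simp [List.flatMap_cons, List.append_assoc, add_assoc]
    · rw [if_neg h, ih]
      have h0 : socks.count k / 2 = 0 := by
        by_contra hne
        exact h (by exact_mod_cast Nat.pos_of_ne_zero hne)
      simp [List.flatMap_cons, h0]
      omega

-- B's run scan on a strictly increasing key list expanded by multiplicities
lemma pvRunsB_flat (c : String → Nat) :
    ∀ (ks : List String), ks.Pairwise (· < ·) → (∀ k ∈ ks, 1 ≤ c k) →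
      pvRunsB (ks.flatMap (fun k => List.replicate (c k) k)) =
        (ks.flatMap (fun k => List.replicate (c k / 2) (pvStrMul2 k)),
         (ks.map (fun k => ((c k / 2 : Nat) : Int))).sum) := by
  intro ks
  induction ks with
  | nil => intro _ _; simp [pvRunsB]
  | cons k ks ih =>
    intro hp hc
    obtain ⟨m, hm⟩ : ∃ m, c k = m + 1 :=
      ⟨c k - 1, by have := hc k (by simp); omega⟩
    have hT : ∀ y ∈ ks.flatMap (fun k => List.replicate (c k) k), k < y := by
      intro y hy
      obtain ⟨k', hk', hy'⟩ := List.mem_flatMap.mp hy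
      rcases List.mem_replicate.mp hy' with ⟨-, rfl⟩
      exact (List.pairwise_cons.mp hp).1 _ hk'
    have htake : (ks.flatMap (fun k => List.replicate (c k) k)).takeWhile (fun y => y == k)
        = [] := by
      cases hT' : ks.flatMap (fun k => List.replicate (c k) k) with
      | nil => simp
      | cons a T' =>
        have ha : k < a := hT a (by rw [hT']; simp)
        simp [(by simpa using ha.ne' : (a == k) = false)]
    have hdrop : (ks.flatMap (fun k => List.replicate (c k) k)).dropWhile (fun y => y == k)
        = ks.flatMap (fun k => List.replicate (c k) k) := by
      cases hT' : ks.flatMap (fun k => List.replicate (c k) k) with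
      | nil => simp
      | cons a T' =>
        have ha : k < a := hT a (by rw [hT']; simp)
        simp [(by simpa using ha.ne' : (a == k) = false)]
    have hflat : (k :: ks).flatMap (fun k => List.replicate (c k) k)
        = k :: (List.replicate m k ++ ks.flatMap (fun k => List.replicate (c k) k)) := by
      rw [List.flatMap_cons, hm]
      simp [List.replicate_succ]
    have hrep_take : (List.replicate m k
          ++ ks.flatMap (fun k => List.replicate (c k) k)).takeWhile (fun y => y == k)
        = List.replicate m k := by
      rw [List.takeWhile_append]
      simp [htake]
    have hrep_drop : (List.replicate m k
          ++ ks.flatMap (fun k => List.replicate (c k) k)).dropWhile (fun y => y == k)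
        = ks.flatMap (fun k => List.replicate (c k) k) := by
      rw [List.dropWhile_append]
      simp [hdrop]
    rw [hflat, pvRunsB]
    simp only [hrep_take, hrep_drop,
      ih (List.pairwise_cons.mp hp).2 (fun x hx => hc x (List.mem_cons_of_mem _ hx)),
      List.length_replicate]
    simp [hm, List.flatMap_cons]

-- counts in the multiplicity expansion
lemma pvCountFlat (socks : List String) :
    ∀ (ks : List String), ks.Nodup → ∀ y,
      (ks.flatMap (fun k => List.replicate (socks.count k) k)).count y
        = if y ∈ ks then socks.count y else 0 := by
  intro ks
  induction ks with
  | nil => intro _ y; simp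
  | cons k ks ih =>
    intro hnd y
    rw [List.flatMap_cons, List.count_append, List.count_replicate, ih hnd.of_cons y]
    by_cases hyk : y = k
    · subst hyk
      have hnotmem : y ∉ ks := (List.nodup_cons.mp hnd).1
      simp [hnotmem]
    · simp [List.mem_cons, hyk, Ne.symm hyk]

-- the replicate expansion of a strictly increasing list is sorted
lemma pvFlatPairwise (c : String → Nat) :
    ∀ (ks : List String), ks.Pairwise (· < ·) →
      (ks.flatMap (fun k => List.replicate (c k) k)).Pairwise (· ≤ ·) := by
  intro ks
  induction ks with
  | nil => intro _; simp
  | cons k ks ih =>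
    intro hp
    rw [List.flatMap_cons]
    refine List.pairwise_append.mpr
      ⟨List.pairwise_replicate_of_refl, ih (List.pairwise_cons.mp hp).2, ?_⟩
    intro x hx y hy
    rcases List.mem_replicate.mp hx with ⟨-, rfl⟩
    obtain ⟨k', hk', hy'⟩ := List.mem_flatMap.mp hy
    rcases List.mem_replicate.mp hy' with ⟨-, rfl⟩
    exact le_of_lt ((List.pairwise_cons.mp hp).1 _ hk')

-- sorted(socks) is the sorted distinct socks, each repeated its multiplicity
lemma sorted_eq_flat (socks : List String) :
    PySem.List.sorted socks (fun x => x) false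
      = (pvKeys socks).flatMap (fun k => List.replicate (socks.count k) k) := by
  apply PySem.List.sorted_id_eq_of_perm_of_pairwise
  · rw [List.perm_iff_count]
    intro y
    rw [pvCountFlat socks _ (pvKeys_nodup socks) y]
    by_cases hy : y ∈ socks
    · simp [(pvKeys_mem socks y).mpr hy]
    · have : y ∉ pvKeys socks := fun h => hy ((pvKeys_mem socks y).mp h)
      simp [this, List.count_eq_zero_of_not_mem hy]
  · exact pvFlatPairwise _ _ (pvKeys_pairwise socks)

-- ===== VERDICT (by name: the statement is the Claim_ definition above) =====
theorem sort_socks_spec : Claim_equal_sort_socks := by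
  intro socks _
  show sort_socks socks = sort_socks_alt socks
  have hA : sort_socks socks =
      (fun r : List String × Int =>
        (if r.1 = [] then "None" else PySem.Str.join " " r.1, r.2))
        ((PySem.List.sorted (count_socks socks).keys (fun x => x) false).foldl
          (pvStepA (count_socks socks)) ([], 0)) := rfl
  have hB : sort_socks_alt socks =
      (fun r : List String × Int =>
        (if r.1 = [] then "None" else PySem.Str.join " " r.1, r.2))
        (pvRunsB (PySem.List.sorted socks (fun x => x) false)) := rfl
  rw [hA, hB, count_socks_eq_counter, PySem.Dict.keys_counter, pvFoldA socks,
    sorted_eq_flat socks,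
    pvRunsB_flat (fun k => socks.count k) (pvKeys socks) (pvKeys_pairwise socks)
      (fun k hk => List.count_pos_iff.mpr ((pvKeys_mem socks k).mp hk))]
  simp [pvKeys]
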